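-- pv_equiv track=rewrite | github.com/Vulcan-Logic/AMD | task3try1.py | getDpVar
-- ===== SOURCE A (Python) =====
-- def getDpVar(equationString):
--     indx=0
--     found=False
--     foundIndx=0
--     retVal=""
--     while indx<len(equationString):
--         if equationString[indx]=="=":
--             retVal=equationString[0:indx]
--             found=True
--             foundIndx=indx
--         indx+=1
--     if found:
--         return(retVal,foundIndx)
--     else:
--         raise Exception("E201","invalid quadartic equation")
-- ===== SOURCE B (Python) =====
-- def getDpVar(equationString):
--     i = len(equationString) - 1
--     while i >= 0:
--         if equationString[i] == "=":
--             return (equationString[:i], i)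
--         i -= 1
--     raise Exception("E201", "invalid quadartic equation")
-- ===== Notes on version B (the rewrite author's own statement) =====
-- stated objective: alternative
-- what changed: Scans from the end and returns immediately at the first '=' found, instead of scanning forward while overwriting the saved prefix and index on every '='.
import Mathlib
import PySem

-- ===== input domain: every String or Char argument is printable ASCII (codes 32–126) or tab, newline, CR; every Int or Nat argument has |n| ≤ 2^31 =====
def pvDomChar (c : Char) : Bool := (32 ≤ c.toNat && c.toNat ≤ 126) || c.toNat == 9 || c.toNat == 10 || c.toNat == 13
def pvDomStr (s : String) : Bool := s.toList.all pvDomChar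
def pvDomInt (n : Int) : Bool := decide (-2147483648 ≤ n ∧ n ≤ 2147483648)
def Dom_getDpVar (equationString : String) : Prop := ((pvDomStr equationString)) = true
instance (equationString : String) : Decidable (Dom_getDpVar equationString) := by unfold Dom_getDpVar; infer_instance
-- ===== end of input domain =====

-- B scans from the end and returns at the first '=' found, instead of A's forward scan
-- overwriting the saved prefix and index on every '='.

-- ===== PORT A =====
-- A's while loop over indx = 0 .. len-1 with state (found, foundIndx, retVal);
-- equationString[0:indx] is cs.take indx (= PySem.List.slice cs (some 0) (some indx)).
def getDpVarStep (cs : List Char) (st : Bool × Nat × List Char) (indx : Nat) :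
    Bool × Nat × List Char :=
  if cs[indx]? = some '=' then (true, indx, cs.take indx) else st

def getDpVar (equationString : String) : String × Int :=
  let cs := equationString.toList
  let st := (List.range cs.length).foldl (getDpVarStep cs) (false, 0, [])
  if st.1 then (String.mk st.2.2, (st.2.1 : Int))
  else ("", -1)   -- A raises Exception("E201", ...) here; excluded by Pre_getDpVar

-- ===== PORT B =====
-- B's downward while loop 'i = len-1; while i >= 0: …; i -= 1' with early return:
-- altLoop cs n inspects indices n-1, n-2, …, 0 and stops at the first '='.
def altLoop (cs : List Char) : Nat → Option (List Char × Nat)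
  | 0 => none
  | i + 1 => if cs[i]? = some '=' then some (cs.take i, i) else altLoop cs i

def getDpVar_alt (equationString : String) : String × Int :=
  let cs := equationString.toList
  match altLoop cs cs.length with
  | some (p, i) => (String.mk p, (i : Int))
  | none => ("", -1)   -- B raises Exception("E201", ...) here; excluded by Pre_getDpVar

-- ===== PRECONDITION & SPEC =====
-- A (and B) raise Exception("E201","invalid quadartic equation") when the string has no '='.
def Pre_getDpVar (equationString : String) : Prop := '=' ∈ equationString.toList
instance (equationString : String) : Decidable (Pre_getDpVar equationString) := by
  unfold Pre_getDpVar; infer_instance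
def pvWitness_getDpVar : String := "x^2=0"

def Spec_getDpVar (equationString : String) (out : String × Int) : Prop := out = getDpVar_alt equationString
instance (equationString : String) (out : String × Int) : Decidable (Spec_getDpVar equationString out) := by unfold Spec_getDpVar; infer_instance

-- ===== CLAIM (what is proved, stated in full; the proofs are below) =====
def Claim_equal_getDpVar : Prop := ∀ (equationString : String), Dom_getDpVar equationString → Pre_getDpVar equationString → Spec_getDpVar equationString (getDpVar equationString)

-- ===== LEMMAS AND PROOFS =====

-- The forward fold over indices [0, n) and the backward early-return loop over the same
-- indices agree: either no '=' occurs below n (both report "not found"), or the fold's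
-- final state is exactly what the backward loop returns.
theorem fold_eq_altLoop (cs : List Char) (n : Nat) :
    ((List.range n).foldl (getDpVarStep cs) (false, 0, []) = (false, 0, []) ∧
      altLoop cs n = none ∧ ∀ i < n, cs[i]? ≠ some '=') ∨
    (∃ p j, (List.range n).foldl (getDpVarStep cs) (false, 0, []) = (true, j, p) ∧
      altLoop cs n = some (p, j)) := by
  induction n with
  | zero => left; refine ⟨rfl, rfl, ?_⟩; intro i hi; omega
  | succ n ih =>
    rw [List.range_succ, List.foldl_append]
    simp only [List.foldl_cons, List.foldl_nil, altLoop]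
    by_cases h : cs[n]? = some '='
    · right
      exact ⟨cs.take n, n, by simp [getDpVarStep, h], by simp [h]⟩
    · rcases ih with ⟨h1, h2, h3⟩ | ⟨p, j, h1, h2⟩
      · left
        refine ⟨by simp [h1, getDpVarStep, h], by simp [h, h2], ?_⟩
        intro i hi
        rcases Nat.lt_succ_iff_lt_or_eq.mp hi with hi' | rfl
        · exact h3 i hi'
        · exact h
      · right
        exact ⟨p, j, by simp [h1, getDpVarStep, h], by simp [h, h2]⟩

-- If '=' occurs in cs, some index below cs.length holds it.
theorem mem_eq_index (cs : List Char) (h : '=' ∈ cs) :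
    ∃ i < cs.length, cs[i]? = some '=' := by
  rcases List.getElem_of_mem h with ⟨i, hi, hget⟩
  exact ⟨i, hi, by simp [hi, hget]⟩

-- ===== VERDICT (by name: the statement is the Claim_ definition above) =====
theorem getDpVar_spec : Claim_equal_getDpVar := by
  intro s _ hpre
  unfold Spec_getDpVar getDpVar getDpVar_alt
  rcases fold_eq_altLoop s.toList s.toList.length with ⟨_, _, h3⟩ | ⟨p, j, h1, h2⟩
  · rcases mem_eq_index s.toList hpre with ⟨i, hi, hget⟩
    exact absurd hget (h3 i hi)
  · dsimp only
    rw [h1, h2]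
    rfl
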